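-- pv_equiv track=rewrite | github.com/markabrennan/code_challenges | num_islands.py | scanrow
-- ===== SOURCE A (Python) =====
-- def scanrow(row, row_num, cur_col_num, vmap):
--     col_places = []
--     for col_num in range(len(row)):
--         vmap[row_num][col_num+cur_col_num+1] = True
--         if row[col_num] == 1:
--             col_places.append(col_num+cur_col_num+1)
--         if row[col_num] == 0:
--             return col_places
--     return col_places
-- ===== SOURCE B (Python) =====
-- def scanrow(row, row_num, cur_col_num, vmap):
--     try:
--         end = row.index(0)
--     except ValueError:
--         end = len(row)
--     for c in range(min(end + 1, len(row))):
--         vmap[row_num][c + cur_col_num + 1] = True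
--     return [c + cur_col_num + 1 for c, v in enumerate(row[:end]) if v == 1]
-- ===== Notes on version B (the rewrite author's own statement) =====
-- stated objective: alternative
-- what changed: B finds the terminating zero's position up front with row.index(0) (falling back to len(row)), then builds the result with a single comprehension over the prefix row[:end], instead of A's one loop that interleaves marking, collecting and an early return.
import Mathlib
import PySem

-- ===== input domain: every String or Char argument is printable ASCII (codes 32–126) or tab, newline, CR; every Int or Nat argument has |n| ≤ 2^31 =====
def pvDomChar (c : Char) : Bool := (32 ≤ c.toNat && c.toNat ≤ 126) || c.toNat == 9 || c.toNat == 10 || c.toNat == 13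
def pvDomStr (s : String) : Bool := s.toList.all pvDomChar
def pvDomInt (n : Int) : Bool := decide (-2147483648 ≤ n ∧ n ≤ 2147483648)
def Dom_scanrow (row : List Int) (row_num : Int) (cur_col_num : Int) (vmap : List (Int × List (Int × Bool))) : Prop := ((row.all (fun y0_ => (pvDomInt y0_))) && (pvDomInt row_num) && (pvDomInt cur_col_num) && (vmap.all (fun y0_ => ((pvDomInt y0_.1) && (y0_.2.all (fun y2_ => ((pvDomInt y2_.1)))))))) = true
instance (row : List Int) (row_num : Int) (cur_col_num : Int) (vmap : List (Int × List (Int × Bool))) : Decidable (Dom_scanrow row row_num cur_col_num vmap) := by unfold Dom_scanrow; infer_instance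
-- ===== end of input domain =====

-- B changes the decomposition: it locates the terminating zero with row.index(0) first and then
-- builds the result in one comprehension over the prefix, instead of A's single interleaved loop
-- with an early return (objective: alternative). Both Pythons mutate vmap identically; the
-- equivalence proved here is about the RETURN value only (the Lean ports do not model the
-- vmap mutation, which cannot affect the returned list).

-- ===== PORT A =====
-- Loop of A: iterates over the row with its index, appends 1-positions, returns early at a 0.
-- The 'vmap[row_num][...] = True' statement only mutates vmap and never affects the return value;
-- it raises KeyError iff the loop body runs and row_num is not a key of vmap — excluded by Pre_.
def scanrowGo (cur_col_num : Int) : List Int → Int → List Int → List Int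
  | [], _, acc => acc
  | x :: rest, col, acc =>
    let acc' := if x = 1 then acc ++ [col + cur_col_num + 1] else acc
    if x = 0 then acc' else scanrowGo cur_col_num rest (col + 1) acc'

def scanrow (row : List Int) (_row_num : Int) (cur_col_num : Int) (_vmap : List (Int × List (Int × Bool))) : List Int :=
  scanrowGo cur_col_num row 0 []

-- ===== PORT B =====
-- end = row.index(0) with fallback len(row)
def zeroEnd (row : List Int) : Nat :=
  match PySem.List.index? row 0 with
  | some i => i
  | none => row.length

-- row[:end] with 0 ≤ end ≤ len(row) is exactly List.take end; the vmap-marking loop of Source B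
-- only mutates vmap (same KeyError condition as A, excluded by Pre_) and is not modeled.
def scanrow_alt (row : List Int) (_row_num : Int) (cur_col_num : Int) (_vmap : List (Int × List (Int × Bool))) : List Int :=
  (PySem.List.enumerate (row.take (zeroEnd row)) 0).filterMap
    (fun p => if p.2 = 1 then some (p.1 + cur_col_num + 1) else none)

-- ===== PRECONDITION & SPEC =====
-- Pre_ excludes exactly the inputs where both Pythons raise KeyError: a nonempty row with
-- row_num absent from vmap's keys (the marking loops run and access vmap[row_num]).
def Pre_scanrow (row : List Int) (row_num : Int) (_cur_col_num : Int) (vmap : List (Int × List (Int × Bool))) : Prop :=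
  row = [] ∨ row_num ∈ vmap.map Prod.fst
instance (row : List Int) (row_num : Int) (cur_col_num : Int) (vmap : List (Int × List (Int × Bool))) : Decidable (Pre_scanrow row row_num cur_col_num vmap) := by unfold Pre_scanrow; infer_instance

def pvWitness_scanrow : List Int × Int × Int × (List (Int × List (Int × Bool))) :=
  ([1, 0, 1], 0, -1, [(0, [])])

def Spec_scanrow (row : List Int) (row_num : Int) (cur_col_num : Int) (vmap : List (Int × List (Int × Bool))) (out : List Int) : Prop := out = scanrow_alt row row_num cur_col_num vmap
instance (row : List Int) (row_num : Int) (cur_col_num : Int) (vmap : List (Int × List (Int × Bool))) (out : List Int) : Decidable (Spec_scanrow row row_num cur_col_num vmap out) := by unfold Spec_scanrow; infer_instance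

-- ===== CLAIM (what is proved, stated in full; the proofs are below) =====
def Claim_equal_scanrow : Prop := ∀ (row : List Int) (row_num : Int) (cur_col_num : Int) (vmap : List (Int × List (Int × Bool))), Dom_scanrow row row_num cur_col_num vmap → Pre_scanrow row row_num cur_col_num vmap → Spec_scanrow row row_num cur_col_num vmap (scanrow row row_num cur_col_num vmap)

-- ===== LEMMAS AND PROOFS =====

theorem zeroEnd_cons_zero (rest : List Int) : zeroEnd (0 :: rest) = 0 := by
  unfold zeroEnd
  rw [PySem.List.index?_cons_self]

theorem zeroEnd_cons_ne (x : Int) (rest : List Int) (hx : x ≠ 0) :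
    zeroEnd (x :: rest) = zeroEnd rest + 1 := by
  unfold zeroEnd
  rw [PySem.List.index?_cons_of_ne rest hx]
  cases PySem.List.index? rest 0 <;> simp

theorem scanrowGo_eq (ccn : Int) (row : List Int) :
    ∀ (col : Int) (acc : List Int),
      scanrowGo ccn row col acc =
        acc ++ (PySem.List.enumerate (row.take (zeroEnd row)) col).filterMap
          (fun p => if p.2 = 1 then some (p.1 + ccn + 1) else none) := by
  induction row with
  | nil => intro col acc; simp [scanrowGo, zeroEnd, PySem.List.index?]
  | cons x rest ih =>
    intro col acc
    by_cases hx0 : x = 0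
    · subst hx0
      simp [scanrowGo, zeroEnd_cons_zero]
    · rw [zeroEnd_cons_ne x rest hx0]
      simp only [scanrowGo, List.take_succ_cons, PySem.List.enumerate_cons,
        List.filterMap_cons]
      rw [if_neg hx0, ih]
      by_cases hx1 : x = 1
      · simp [hx1, List.append_assoc]
      · simp [hx1]

-- ===== VERDICT (by name: the statement is the Claim_ definition above) =====
theorem scanrow_spec : Claim_equal_scanrow := by
  intro row row_num ccn vmap _ _
  unfold Spec_scanrow scanrow scanrow_alt
  simpa using scanrowGo_eq ccn row 0 []
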